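-- pv_equiv track=rewrite | github.com/idfkit/idfkit-docs | scripts/schema_utils.py | _compute_field_ids
-- ===== SOURCE A (Python) =====
-- from typing import Any
--
-- def _compute_field_ids(
--     field_names: list[str],
--     field_info: dict[str, Any],
-- ) -> dict[str, str]:
--     """Reconstruct IDD field IDs (A1, N1, ...) from legacy_idd metadata."""
--     alpha_count = 0
--     numeric_count = 0
--     ids: dict[str, str] = {}
--     for name in field_names:
--         ft = field_info.get(name, {}).get("field_type", "a")
--         if ft == "a":
--             alpha_count += 1
--             ids[name] = f"A{alpha_count}"
--         else:
--             numeric_count += 1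
--             ids[name] = f"N{numeric_count}"
--     return ids
-- ===== SOURCE B (Python) =====
-- def _compute_field_ids(
--     field_names: list[str],
--     field_info: dict,
-- ) -> dict[str, str]:
--     """Reconstruct IDD field IDs (A1, N1, ...) from legacy_idd metadata."""
--     flags = [field_info.get(n, {}).get("field_type", "a") == "a" for n in field_names]
--     prefix = [0]
--     for f in flags:
--         prefix.append(prefix[-1] + f)
--     return {
--         name: f"A{prefix[i + 1]}" if flags[i] else f"N{i + 1 - prefix[i + 1]}"
--         for i, name in enumerate(field_names)
--     }
-- ===== Notes on version B (the rewrite author's own statement) =====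
-- stated objective: alternative
-- what changed: A threads two running counters (alpha_count/numeric_count) through one interleaved loop; B first tabulates the per-name type flags and a prefix-sum table of alpha flags in separate passes, then builds each id independently in a dict comprehension (A-count = prefix[i+1], N-count = i+1-prefix[i+1]).
import Mathlib
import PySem

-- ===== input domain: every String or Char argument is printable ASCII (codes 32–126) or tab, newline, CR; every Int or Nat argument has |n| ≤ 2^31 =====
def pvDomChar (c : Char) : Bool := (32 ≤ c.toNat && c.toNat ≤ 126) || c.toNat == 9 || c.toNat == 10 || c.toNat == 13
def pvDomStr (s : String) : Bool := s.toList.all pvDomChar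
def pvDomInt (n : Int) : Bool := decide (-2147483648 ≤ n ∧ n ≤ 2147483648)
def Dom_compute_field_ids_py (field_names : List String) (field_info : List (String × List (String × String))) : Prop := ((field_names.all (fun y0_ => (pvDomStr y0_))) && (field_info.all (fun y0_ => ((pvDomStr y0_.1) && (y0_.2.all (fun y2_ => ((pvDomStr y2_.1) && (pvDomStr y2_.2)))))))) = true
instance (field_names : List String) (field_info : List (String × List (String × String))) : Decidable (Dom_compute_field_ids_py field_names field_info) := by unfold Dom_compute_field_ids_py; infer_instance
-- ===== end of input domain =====

-- ===== PORT A =====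
-- B replaces A's single loop with two interleaved running counters by a precomputed
-- flag table plus a prefix-sum table, each id read off the tables (objective: alternative).
-- A's loop, as structural recursion over the same state (alpha_count, numeric_count, ids).
def pvALoop (field_info : List (String × List (String × String))) :
    List String → Int → Int → PySem.Dict String String → PySem.Dict String String
  | [], _, _, ids => ids
  | name :: rest, alpha_count, numeric_count, ids =>
    let ft := PySem.Dict.getD (PySem.Dict.mk (PySem.Dict.getD (PySem.Dict.mk field_info) name [])) "field_type" "a"
    if ft == "a" then
      pvALoop field_info rest (alpha_count + 1) numeric_count
        (PySem.Dict.insert ids name ("A" ++ PySem.Int.toStr (alpha_count + 1)))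
    else
      pvALoop field_info rest alpha_count (numeric_count + 1)
        (PySem.Dict.insert ids name ("N" ++ PySem.Int.toStr (numeric_count + 1)))

def compute_field_ids_py (field_names : List String) (field_info : List (String × List (String × String))) : List (String × String) :=
  (pvALoop field_info field_names 0 0 (PySem.Dict.mk [])).items

-- ===== PORT B =====
-- field_info.get(n, {}).get("field_type", "a") == "a"
def pvBFlag (field_info : List (String × List (String × String))) (n : String) : Bool :=
  PySem.Dict.getD (PySem.Dict.mk (PySem.Dict.getD (PySem.Dict.mk field_info) n [])) "field_type" "a" == "a"

def compute_field_ids_py_alt (field_names : List String) (field_info : List (String × List (String × String))) : List (String × String) :=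
  let flags := field_names.map (pvBFlag field_info)
  -- prefix = [0]; for f in flags: prefix.append(prefix[-1] + f)
  let pfx := flags.foldl (fun acc f => acc ++ [PySem.List.pyGetD acc (-1) 0 + (if f then 1 else 0)]) [(0 : Int)]
  ((PySem.List.enumerate field_names).foldl
    (fun ids p =>
      PySem.Dict.insert ids p.2
        (if PySem.List.pyGetD flags p.1 true then
           "A" ++ PySem.Int.toStr (PySem.List.pyGetD pfx (p.1 + 1) 0)
         else
           "N" ++ PySem.Int.toStr (p.1 + 1 - PySem.List.pyGetD pfx (p.1 + 1) 0)))
    (PySem.Dict.mk [])).items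

-- ===== PRECONDITION & SPEC =====
def Spec_compute_field_ids_py (field_names : List String) (field_info : List (String × List (String × String))) (out : List (String × String)) : Prop := out = compute_field_ids_py_alt field_names field_info
instance (field_names : List String) (field_info : List (String × List (String × String))) (out : List (String × String)) : Decidable (Spec_compute_field_ids_py field_names field_info out) := by unfold Spec_compute_field_ids_py; infer_instance

-- ===== CLAIM (what is proved, stated in full; the proofs are below) =====
def Claim_equal_compute_field_ids_py : Prop := ∀ (field_names : List String) (field_info : List (String × List (String × String))), Dom_compute_field_ids_py field_names field_info → Spec_compute_field_ids_py field_names field_info (compute_field_ids_py field_names field_info)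

-- ===== LEMMAS AND PROOFS =====

-- the value of B's prefix-sum table: entry k is the number of true flags among the first k
def pvPfx (fl : List Bool) : List Int :=
  (List.range (fl.length + 1)).map (fun k => (((fl.take k).count true : Nat) : Int))

theorem pv_pfx_snoc (gs : List Bool) (f : Bool) :
    pvPfx (gs ++ [f]) = pvPfx gs ++ [((gs.count true : Nat) : Int) + (if f then 1 else 0)] := by
  unfold pvPfx
  rw [show (gs ++ [f]).length + 1 = (gs.length + 1) + 1 by simp,
    List.range_succ, List.map_append]
  congr 1
  · apply List.map_congr_left
    intro k hk
    rw [List.mem_range] at hk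
    rw [List.take_append, show k - gs.length = 0 by omega]
    simp
  · simp [List.take_of_length_le, List.count_append]
    cases f <;> simp

theorem pv_pfx_fold (fs : List Bool) :
    ∀ gs : List Bool,
      fs.foldl (fun acc f => acc ++ [PySem.List.pyGetD acc (-1) 0 + (if f then 1 else 0)]) (pvPfx gs)
        = pvPfx (gs ++ fs) := by
  induction fs with
  | nil => intro gs; simp
  | cons f rest ih =>
    intro gs
    rw [List.foldl_cons,
      show PySem.List.pyGetD (pvPfx gs) (-1) 0 = ((gs.count true : Nat) : Int) by
        unfold pvPfx
        rw [List.range_succ, List.map_append]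
        simp [PySem.List.pyGetD],
      ← pv_pfx_snoc, ih (gs ++ [f])]
    simp

theorem pv_key (field_info : List (String × List (String × String)))
    (fl : List Bool) (pfx : List Int) :
    ∀ (suf pre : List String) (ids : PySem.Dict String String),
      fl = (pre ++ suf).map (pvBFlag field_info) →
      pfx = pvPfx fl →
      (PySem.List.enumerate suf (pre.length : Int)).foldl
        (fun ids p =>
          PySem.Dict.insert ids p.2
            (if PySem.List.pyGetD fl p.1 true then
               "A" ++ PySem.Int.toStr (PySem.List.pyGetD pfx (p.1 + 1) 0)
             else
               "N" ++ PySem.Int.toStr (p.1 + 1 - PySem.List.pyGetD pfx (p.1 + 1) 0)))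
        ids
      = pvALoop field_info suf
          ((pre.map (pvBFlag field_info)).count true)
          ((pre.map (pvBFlag field_info)).count false) ids := by
  intro suf
  induction suf with
  | nil => intro pre ids h hp; simp [PySem.List.enumerate, pvALoop]
  | cons name rest ih =>
    intro pre ids h hp
    have hfl : fl = pre.map (pvBFlag field_info) ++ pvBFlag field_info name :: rest.map (pvBFlag field_info) := by
      simp [h]
    have hlen : pre.length + 1 ≤ fl.length := by
      rw [hfl]; simp
    have hf : PySem.List.pyGetD fl ((pre.length : Int)) true = pvBFlag field_info name := by
      rw [hfl, show ((pre.length : Int)) = (((pre.map (pvBFlag field_info)).length : Nat) : Int) by simp,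
        PySem.List.pyGetD_natCast, List.getD_append_right _ _ _ _ (le_refl _)]
      simp
    have htake : fl.take (pre.length + 1) = pre.map (pvBFlag field_info) ++ [pvBFlag field_info name] := by
      rw [hfl, List.take_append]
      simp
    have hpget : PySem.List.pyGetD pfx ((pre.length : Int) + 1) 0
        = (((fl.take (pre.length + 1)).count true : Nat) : Int) := by
      rw [hp, show ((pre.length : Int) + 1) = ((pre.length + 1 : Nat) : Int) by push_cast; ring,
        PySem.List.pyGetD_natCast]
      unfold pvPfx
      rw [PySem.List.getD_map_range _ _ _ _ (by omega)]
    have hsum : (pre.map (pvBFlag field_info)).count true + (pre.map (pvBFlag field_info)).count false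
        = pre.length := by
      rw [List.count_true_add_count_false]; simp
    rw [PySem.List.enumerate_cons, List.foldl_cons]
    simp only [hf, hpget, htake, List.count_append, List.count_cons, List.count_nil]
    by_cases hb : pvBFlag field_info name = true
    · rw [pvALoop]
      have hbb : (PySem.Dict.getD (PySem.Dict.mk (PySem.Dict.getD (PySem.Dict.mk field_info) name [])) "field_type" "a" == "a") = true := by
        simpa [pvBFlag] using hb
      simp only [hbb, if_true, hb]
      have h1 : ((PySem.List.enumerate rest ((pre.length : Int) + 1)))
          = PySem.List.enumerate rest (((pre ++ [name]).length : Nat) : Int) := by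
        simp
      rw [h1, ih (pre ++ [name]) _ (by simpa using hfl) hp]
      have hct : ((pre ++ [name]).map (pvBFlag field_info)).count true
          = (pre.map (pvBFlag field_info)).count true + 1 := by
        simp [List.count_append, hb]
      have hcf : ((pre ++ [name]).map (pvBFlag field_info)).count false
          = (pre.map (pvBFlag field_info)).count false := by
        simp [List.count_append, hb]
      rw [hct, hcf]
      push_cast
      simp
    · have hb2 : pvBFlag field_info name = false := by simpa using hb
      rw [pvALoop]
      have hbb : (PySem.Dict.getD (PySem.Dict.mk (PySem.Dict.getD (PySem.Dict.mk field_info) name [])) "field_type" "a" == "a") = false := by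
        simpa [pvBFlag] using hb2
      simp only [hbb, if_false, hb2, Bool.false_eq_true]
      have h1 : ((PySem.List.enumerate rest ((pre.length : Int) + 1)))
          = PySem.List.enumerate rest (((pre ++ [name]).length : Nat) : Int) := by
        simp
      rw [h1, ih (pre ++ [name]) _ (by simpa using hfl) hp]
      have hct : ((pre ++ [name]).map (pvBFlag field_info)).count true
          = (pre.map (pvBFlag field_info)).count true := by
        simp [List.count_append, hb2]
      have hcf : ((pre ++ [name]).map (pvBFlag field_info)).count false
          = (pre.map (pvBFlag field_info)).count false + 1 := by
        simp [List.count_append, hb2]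
      have hbt : List.count true (List.take (pre.length + 1) fl)
          = List.count true (List.map (pvBFlag field_info) pre) := by
        rw [htake]; simp [hb2]
      rw [hct, hcf]
      congr 1
      push_cast
      congr 2
      congr 1
      simp only [beq_iff_eq, Bool.false_eq_true, if_false, add_zero]
      omega

-- ===== VERDICT (by name: the statement is the Claim_ definition above) =====
theorem compute_field_ids_py_spec : Claim_equal_compute_field_ids_py := by
  intro field_names field_info _
  unfold Spec_compute_field_ids_py compute_field_ids_py compute_field_ids_py_alt
  have hp : (field_names.map (pvBFlag field_info)).foldl
      (fun acc f => acc ++ [PySem.List.pyGetD acc (-1) 0 + (if f then 1 else 0)]) [(0 : Int)]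
      = pvPfx (field_names.map (pvBFlag field_info)) := by
    have h0 : ([(0 : Int)]) = pvPfx [] := by simp [pvPfx]
    rw [h0, pv_pfx_fold]
    simp
  have h := pv_key field_info (field_names.map (pvBFlag field_info))
      (pvPfx (field_names.map (pvBFlag field_info))) field_names [] (PySem.Dict.mk [])
      (by simp) rfl
  simp only [List.length_nil, Nat.cast_zero, List.map_nil, List.count_nil] at h
  rw [← hp] at h
  exact congrArg PySem.Dict.items h.symm
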